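-- pv_equiv track=rewrite | github.com/spyderbat/spyctl | spyctl/tests/diff_test.py | find_list_item_prefix
-- ===== SOURCE A (Python) =====
-- from typing import Dict, List, Optional, Tuple, NamedTuple, Union
--
-- LIST_MARKER = "- "
--
-- DEFAULT_WHITESPACE = "  "
--
-- def find_list_item_prefix(ancestor_fields: List[str]) -> str:
--     if len(ancestor_fields) == 0:
--         return LIST_MARKER
--     prefix = []
--     found_actual_field = False
--     for item in reversed(ancestor_fields):
--         if item == LIST_MARKER and not found_actual_field:
--             prefix.append(LIST_MARKER)
--         else:
--             found_actual_field = True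
--             prefix.append(DEFAULT_WHITESPACE)
--     prefix.reverse()
--     prefix.append(LIST_MARKER)
--     if prefix[0] == DEFAULT_WHITESPACE:
--         prefix.pop(0)
--     prefix = "".join(prefix)
--     return prefix
-- ===== SOURCE B (Python) =====
-- LIST_MARKER = "- "
--
-- DEFAULT_WHITESPACE = "  "
--
-- def find_list_item_prefix(ancestor_fields):
--     n = len(ancestor_fields)
--     t = 0
--     for item in reversed(ancestor_fields):
--         if item != LIST_MARKER:
--             break
--         t += 1
--     return DEFAULT_WHITESPACE * (n - t - 1) + LIST_MARKER * (t + 1)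
-- ===== Notes on version B (the rewrite author's own statement) =====
-- stated objective: simpler
-- what changed: Replaces A's token-list construction, reverse, append and conditional pop by counting the trailing run of LIST_MARKER items and returning one closed-form string DEFAULT_WHITESPACE*(n-t-1) + LIST_MARKER*(t+1).
import Mathlib
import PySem

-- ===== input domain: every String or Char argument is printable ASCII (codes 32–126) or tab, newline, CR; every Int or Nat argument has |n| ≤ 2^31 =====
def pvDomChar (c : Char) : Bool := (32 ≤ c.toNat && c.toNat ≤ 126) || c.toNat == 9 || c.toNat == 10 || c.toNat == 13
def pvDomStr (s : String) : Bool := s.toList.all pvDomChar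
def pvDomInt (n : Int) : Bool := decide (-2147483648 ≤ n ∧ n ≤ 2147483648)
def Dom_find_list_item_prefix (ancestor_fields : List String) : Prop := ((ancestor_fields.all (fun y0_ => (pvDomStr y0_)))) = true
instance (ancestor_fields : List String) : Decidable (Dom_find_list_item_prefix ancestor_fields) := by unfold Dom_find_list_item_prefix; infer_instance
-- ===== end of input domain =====

-- B replaces A's token-list build/reverse/append/pop by counting the trailing marker run and
-- returning one closed-form string (objective: simpler).

-- ===== PORT A =====
-- literal transliteration of A: build token list over reversed input with a found flag,
-- reverse, append "- ", pop a leading "  ", join.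
def find_list_item_prefix (ancestor_fields : List String) : String :=
  if ancestor_fields.length == 0 then "- "
  else
    let st := ancestor_fields.reverse.foldl
      (fun (acc : List String × Bool) item =>
        if item == "- " && !acc.2 then (acc.1 ++ ["- "], acc.2)
        else (acc.1 ++ ["  "], true))
      ([], false)
    let pre := st.1.reverse ++ ["- "]
    let pre := if pre.head? == some "  " then pre.drop 1 else pre
    String.join pre

-- ===== PORT B =====
-- count of the leading run of "- " (B applies it to the reversed list)
def pvTrailMarkers : List String → Nat
  | [] => 0
  | x :: xs => if x == "- " then pvTrailMarkers xs + 1 else 0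

def find_list_item_prefix_alt (ancestor_fields : List String) : String :=
  let n := ancestor_fields.length
  let t := pvTrailMarkers ancestor_fields.reverse
  String.join (List.replicate (n - t - 1) "  ") ++ String.join (List.replicate (t + 1) "- ")

-- ===== PRECONDITION & SPEC =====
def Spec_find_list_item_prefix (ancestor_fields : List String) (out : String) : Prop := out = find_list_item_prefix_alt ancestor_fields
instance (ancestor_fields : List String) (out : String) : Decidable (Spec_find_list_item_prefix ancestor_fields out) := by unfold Spec_find_list_item_prefix; infer_instance

-- ===== CLAIM (what is proved, stated in full; the proofs are below) =====
def Claim_equal_find_list_item_prefix : Prop := ∀ (ancestor_fields : List String), Dom_find_list_item_prefix ancestor_fields → Spec_find_list_item_prefix ancestor_fields (find_list_item_prefix ancestor_fields)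

-- ===== LEMMAS AND PROOFS =====

theorem pvTrailMarkers_le (r : List String) : pvTrailMarkers r ≤ r.length := by
  induction r with
  | nil => simp [pvTrailMarkers]
  | cons x xs ih => simp only [pvTrailMarkers, List.length_cons]; split <;> omega

theorem pvFold_found (r pre : List String) :
    r.foldl (fun (acc : List String × Bool) item =>
        if item == "- " && !acc.2 then (acc.1 ++ ["- "], acc.2)
        else (acc.1 ++ ["  "], true)) (pre, true)
      = (pre ++ List.replicate r.length "  ", true) := by
  induction r generalizing pre with
  | nil => simp
  | cons x xs ih =>
      simp only [List.foldl_cons]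
      split
      · next h => simp at h
      · rw [ih]; simp [List.replicate_succ, List.append_assoc]

theorem pvFold_char (r pre : List String) :
    r.foldl (fun (acc : List String × Bool) item =>
        if item == "- " && !acc.2 then (acc.1 ++ ["- "], acc.2)
        else (acc.1 ++ ["  "], true)) (pre, false)
      = (pre ++ List.replicate (pvTrailMarkers r) "- "
             ++ List.replicate (r.length - pvTrailMarkers r) "  ",
         decide (pvTrailMarkers r ≠ r.length)) := by
  induction r generalizing pre with
  | nil => simp [pvTrailMarkers]
  | cons x xs ih =>
      simp only [List.foldl_cons]
      split
      · next h =>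
          have hx : x = "- " := by simpa using h
          rw [ih]
          have hle := pvTrailMarkers_le xs
          simp only [pvTrailMarkers, hx, List.length_cons]
          refine Prod.ext ?_ ?_
          · simp [List.replicate_succ, List.append_assoc]
          · simp only []
            have : pvTrailMarkers xs + 1 ≠ xs.length + 1 ↔
                pvTrailMarkers xs ≠ xs.length := by omega
            simp [this]
      · next h =>
          have hx : ¬ x = "- " := by simpa using h
          rw [pvFold_found]
          simp [pvTrailMarkers, hx, List.length_cons, List.replicate_succ]

theorem pvFoldl_append_init (l : List String) (s : String) :
    List.foldl (fun r t => r ++ t) s l = s ++ List.foldl (fun r t => r ++ t) "" l := by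
  induction l generalizing s with
  | nil => simp
  | cons x xs ih =>
      simp only [List.foldl_cons]
      rw [ih (s ++ x), ih (("" : String) ++ x)]
      simp [String.append_assoc]

theorem pvJoin_append (l1 l2 : List String) :
    String.join (l1 ++ l2) = String.join l1 ++ String.join l2 := by
  simp only [String.join, List.foldl_append]
  exact pvFoldl_append_init l2 _

-- ===== VERDICT (by name: the statement is the Claim_ definition above) =====
theorem find_list_item_prefix_spec : Claim_equal_find_list_item_prefix := by
  intro a _
  show find_list_item_prefix a = find_list_item_prefix_alt a
  unfold find_list_item_prefix find_list_item_prefix_alt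
  by_cases hn : a = []
  · subst hn; decide
  · have hne : (a.length == 0) = false := by
      simp [List.length_eq_zero_iff, hn]
    rw [hne]
    simp only [Bool.false_eq_true, if_false]
    rw [pvFold_char]
    have hlen : a.reverse.length = a.length := by simp
    have htle : pvTrailMarkers a.reverse ≤ a.length := by
      have := pvTrailMarkers_le a.reverse; omega
    have hpos : 1 ≤ a.length := by
      cases a with
      | nil => exact absurd rfl hn
      | cons _ _ => simp
    simp only [List.nil_append, List.reverse_append, List.reverse_replicate, hlen]
    by_cases hall : pvTrailMarkers a.reverse = a.length
    · have h0 : a.length - pvTrailMarkers a.reverse = 0 := by omega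
      rw [h0, hall]
      have hhd : (List.replicate (0:Nat) "  " ++ List.replicate a.length "- "
          ++ ["- "]).head? = some "- " := by
        obtain ⟨m, hm⟩ : ∃ m, a.length = m + 1 := ⟨a.length - 1, by omega⟩
        rw [hm]; simp [List.replicate_succ]
      rw [hhd, if_neg (by decide)]
      have hrep : List.replicate a.length "- " ++ ["- "]
          = List.replicate (a.length + 1) "- " := by
        simp [List.replicate_succ']
      simp only [List.replicate_zero, List.nil_append, hrep, Nat.zero_sub]
      simp [String.join]
    · obtain ⟨k, hk⟩ : ∃ k, a.length - pvTrailMarkers a.reverse = k + 1 :=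
        ⟨a.length - pvTrailMarkers a.reverse - 1, by omega⟩
      rw [hk]
      simp only [Nat.add_sub_cancel]
      simp only [List.replicate_succ, List.cons_append, List.head?_cons]
      rw [if_pos (by simp)]
      simp only [List.drop_succ_cons, List.drop_zero]
      rw [List.append_assoc, pvJoin_append]
      congr 1
      rw [show List.replicate (pvTrailMarkers a.reverse) "- " ++ ["- "]
          = List.replicate (pvTrailMarkers a.reverse + 1) "- " from by
        simp [List.replicate_succ']]
      simp [List.replicate_succ]
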